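-- pv_equiv track=rewrite | github.com/eliottcassidy2000/math | 04-computation/typed_GT.py | direct_ET
-- ===== SOURCE A (Python) =====
-- from itertools import permutations, combinations
--
-- def direct_ET(A, n, t_val):
--     """Hamiltonian-path descent polynomial: sum over Hamiltonian paths of t^{des(H)}.
--
--     WARNING: This is E_T^ham(t), NOT E_T^perm(t). G_T(t,2) equals the
--     all-permutation forward-edge polynomial E_T^perm(t), not this function.
--     See THM-062/063 and forward_edge_dist_dp for the correct definition.
--     """
--     total = 0
--     for perm in permutations(range(n)):
--         valid = all(A[perm[i]][perm[i+1]] == 1 for i in range(n-1))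
--         if valid:
--             desc = sum(1 for i in range(n-1) if perm[i] > perm[i+1])
--             total += t_val**desc
--     return total
-- ===== SOURCE B (Python) =====
-- def direct_ET(A, n, t_val):
--     """Same Hamiltonian-path descent polynomial, computed by pruned DFS over
--     partial paths (multiplying the per-edge descent factor along the way)
--     instead of enumerating all n! permutations and filtering."""
--     def go(rem, last, acc):
--         if not rem:
--             return acc
--         total = 0
--         for i in range(len(rem)):
--             v = rem[i]
--             if A[last][v] == 1:
--                 total += go(rem[:i] + rem[i+1:], v, acc * t_val if last > v else acc)
--         return total
--
--     verts = list(range(n))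
--     if not verts:
--         return 1
--     total = 0
--     for i in range(len(verts)):
--         total += go(verts[:i] + verts[i+1:], verts[i], 1)
--     return total
-- ===== Notes on version B (the rewrite author's own statement) =====
-- stated objective: alternative
-- what changed: A enumerates all n! permutations and then tests each for being a Hamiltonian path; B does a depth-first search over partial paths that abandons a branch as soon as an edge is missing, carrying the descent factor t^descents as a running product.
import Mathlib
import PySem

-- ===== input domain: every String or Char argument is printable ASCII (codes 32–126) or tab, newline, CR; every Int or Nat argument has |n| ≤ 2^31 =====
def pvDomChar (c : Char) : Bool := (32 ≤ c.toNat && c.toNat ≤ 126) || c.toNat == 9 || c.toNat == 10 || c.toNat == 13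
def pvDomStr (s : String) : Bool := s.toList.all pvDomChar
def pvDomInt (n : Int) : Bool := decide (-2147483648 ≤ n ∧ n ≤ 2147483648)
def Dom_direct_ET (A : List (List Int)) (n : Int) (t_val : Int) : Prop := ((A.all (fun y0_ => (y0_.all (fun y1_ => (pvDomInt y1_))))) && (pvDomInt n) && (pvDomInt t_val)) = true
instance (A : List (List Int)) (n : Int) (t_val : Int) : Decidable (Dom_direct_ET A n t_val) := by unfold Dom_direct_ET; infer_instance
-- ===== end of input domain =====

-- B replaces A's enumerate-all-permutations-and-filter by a depth-first search over partial
-- Hamiltonian paths that abandons a branch at a missing edge, carrying the descent factor as a running product (objective: alternative).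


-- ===== PORT A =====
-- A[u][v] on in-range nonnegative indices (Pre_ guarantees every access is in range)
def pvEntry (M : List (List Int)) (u v : Int) : Int := (M.getD u.toNat []).getD v.toNat 0

-- all(A[perm[i]][perm[i+1]] == 1 for i in range(n-1)): the consecutive pairs of perm
def pvValid (M : List (List Int)) : List Int → Bool
  | a :: b :: r => (pvEntry M a b == 1) && pvValid M (b :: r)
  | _ => true

-- sum(1 for i in range(n-1) if perm[i] > perm[i+1])
def pvDesc : List Int → Nat
  | a :: b :: r => (if a > b then 1 else 0) + pvDesc (b :: r)
  | _ => 0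

def direct_ET (A : List (List Int)) (n : Int) (t_val : Int) : Int :=
  let verts := PySem.List.pyRange 0 n 1
  (PySem.List.permutations verts verts.length).foldl
    (fun total perm => if pvValid A perm then total + t_val ^ pvDesc perm else total) 0

-- ===== PORT B =====
-- go(rem, last, acc) from Source B; the fuel argument is always rem.length (rem shrinks by one per call)
def pvGo (M : List (List Int)) (t : Int) : Nat → List Int → Int → Int → Int
  | _, [], _, acc => acc
  | 0, _ :: _, _, _ => 0   -- unreachable: fuel = rem.length
  | k+1, hd :: tl, last, acc =>
      (List.range (hd :: tl).length).foldl
        (fun total i =>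
          if pvEntry M last ((hd :: tl).getD i 0) == 1 then
            total + pvGo M t k ((hd :: tl).eraseIdx i) ((hd :: tl).getD i 0)
              (if last > (hd :: tl).getD i 0 then acc * t else acc)
          else total) 0

def direct_ET_alt (A : List (List Int)) (n : Int) (t_val : Int) : Int :=
  let verts := PySem.List.pyRange 0 n 1
  if verts.isEmpty then 1
  else
    (List.range verts.length).foldl
      (fun total i =>
        total + pvGo A t_val (verts.eraseIdx i).length (verts.eraseIdx i) (verts.getD i 0) 1) 0

-- ===== PRECONDITION & SPEC =====
-- Pre_ excludes exactly the inputs on which A raises IndexError: n ≥ 2 while some vertex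
-- row A[u] (u < n) is missing, or some off-diagonal entry A[u][v] (u,v < n, u ≠ v) is missing.
def Pre_direct_ET (A : List (List Int)) (n : Int) (t_val : Int) : Prop :=
  n ≤ 1 ∨ (n ≤ (A.length : Int) ∧
    ∀ u ∈ List.range n.toNat, ∀ v ∈ List.range n.toNat, v ≠ u → v < (A.getD u []).length)
instance (A : List (List Int)) (n : Int) (t_val : Int) : Decidable (Pre_direct_ET A n t_val) := by
  unfold Pre_direct_ET; infer_instance

def pvWitness_direct_ET : List (List Int) × Int × Int := ([[1, 1], [1, 0]], 2, 3)

def Spec_direct_ET (A : List (List Int)) (n : Int) (t_val : Int) (out : Int) : Prop := out = direct_ET_alt A n t_val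
instance (A : List (List Int)) (n : Int) (t_val : Int) (out : Int) : Decidable (Spec_direct_ET A n t_val out) := by unfold Spec_direct_ET; infer_instance

-- ===== CLAIM (what is proved, stated in full; the proofs are below) =====
def Claim_equal_direct_ET : Prop := ∀ (A : List (List Int)) (n : Int) (t_val : Int), Dom_direct_ET A n t_val → Pre_direct_ET A n t_val → Spec_direct_ET A n t_val (direct_ET A n t_val)

-- ===== LEMMAS AND PROOFS =====

-- weight of the path last :: p: product over edges of (t if descent else 1), 0 if some edge is missing
def pvW (M : List (List Int)) (t : Int) (last : Int) : List Int → Int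
  | [] => 1
  | v :: r => if pvEntry M last v == 1 then (if last > v then t else 1) * pvW M t v r else 0

theorem pvW_char (M : List (List Int)) (t : Int) :
    ∀ (p : List Int) (v : Int), (if pvValid M (v :: p) then t ^ pvDesc (v :: p) else 0) = pvW M t v p := by
  intro p
  induction p with
  | nil => intro v; simp [pvValid, pvDesc, pvW]
  | cons b r ih =>
    intro v
    rw [pvW]
    rw [← ih b]
    by_cases he : pvEntry M v b == 1 <;>
      simp [pvValid, pvDesc, he, pow_add, pow_succ]

theorem sum_flatMap_int {α : Type} (l : List α) (f : α → List Int) :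
    (l.flatMap f).sum = (l.map (fun a => (f a).sum)).sum := by
  induction l with
  | nil => rfl
  | cons h t ih => simp [List.flatMap_cons, ih]

theorem perms_succ (xs : List Int) (k : Nat) :
    PySem.List.permutations xs (k+1)
      = (List.range xs.length).flatMap
          (fun i => (PySem.List.permutations (xs.eraseIdx i) k).map (fun p => xs.getD i 0 :: p)) := by
  rw [PySem.List.permutations]
  rw [List.flatMap_def, List.flatMap_def]
  apply congrArg
  apply List.map_congr_left
  intro i hi
  have hilt : i < xs.length := List.mem_range.mp hi
  rw [List.getElem?_eq_getElem hilt, List.getD_eq_getElem _ _ hilt]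

theorem foldl_if_add {α : Type} (l : List α) (c : α → Bool) (g : α → Int) (a : Int) :
    l.foldl (fun acc x => if c x then acc + g x else acc) a
      = a + (l.map (fun x => if c x then g x else 0)).sum := by
  have : (fun (acc : Int) (x : α) => if c x then acc + g x else acc)
      = fun acc x => acc + (if c x then g x else 0) := by
    funext acc x; split_ifs <;> simp
  rw [this, PySem.List.foldl_add]

theorem pvGo_eq (M : List (List Int)) (t : Int) :
    ∀ (k : Nat) (rem : List Int) (last acc : Int), rem.length = k →
      pvGo M t k rem last acc = acc * ((PySem.List.permutations rem k).map (pvW M t last)).sum := by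
  intro k
  induction k with
  | zero =>
    intro rem last acc hl
    have : rem = [] := List.length_eq_zero_iff.mp hl
    subst this
    simp [pvGo, PySem.List.permutations, pvW]
  | succ k ih =>
    intro rem last acc hl
    match rem, hl with
    | hd :: tl, hl =>
      rw [pvGo]
      rw [foldl_if_add (c := fun i => pvEntry M last ((hd :: tl).getD i 0) == 1)
        (g := fun i => pvGo M t k ((hd :: tl).eraseIdx i) ((hd :: tl).getD i 0)
            (if last > (hd :: tl).getD i 0 then acc * t else acc))]
      rw [perms_succ]
      rw [List.map_flatMap, sum_flatMap_int, zero_add]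
      rw [← List.sum_map_mul_left]
      apply congrArg
      apply List.map_congr_left
      intro i hi
      have hilt : i < (hd :: tl).length := List.mem_range.mp hi
      set v := (hd :: tl).getD i 0 with hv
      have hek : ((hd :: tl).eraseIdx i).length = k := by
        rw [List.length_eraseIdx_of_lt hilt]; omega
      rw [List.map_map]
      by_cases he : pvEntry M last v == 1
      · rw [if_pos he, ih _ _ _ hek]
        have : (pvW M t last ∘ fun p => v :: p) = fun p =>
            (if last > v then t else 1) * pvW M t v p := by
          funext p; simp [Function.comp, pvW, he]
        rw [this, List.sum_map_mul_left]
        split_ifs <;> ring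
      · rw [if_neg he]
        have : (pvW M t last ∘ fun p => v :: p) = fun _ => (0 : Int) := by
          funext p; simp [Function.comp, pvW, he]
        rw [this]
        simp


-- the two ports agree for EVERY vertex list, hence in particular for pyRange 0 n 1
theorem main_eq (M : List (List Int)) (t : Int) (V : List Int) :
    (PySem.List.permutations V V.length).foldl
        (fun total perm => if pvValid M perm then total + t ^ pvDesc perm else total) 0
      = if V.isEmpty then 1
        else (List.range V.length).foldl
          (fun total i => total + pvGo M t ((V.eraseIdx i).length) (V.eraseIdx i) (V.getD i 0) 1) 0 := by
  rw [foldl_if_add]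
  cases V with
  | nil => simp [pvValid, pvDesc]
  | cons hd tl =>
    simp only [List.isEmpty_cons, if_neg (by simp : ¬ (false = true))]
    rw [PySem.List.foldl_add (g := fun i =>
      pvGo M t (((hd :: tl).eraseIdx i).length) ((hd :: tl).eraseIdx i) ((hd :: tl).getD i 0) 1)]
    rw [show (hd :: tl).length = ((hd :: tl).length - 1) + 1 from by simp]
    rw [perms_succ]
    rw [List.map_flatMap, sum_flatMap_int, zero_add, zero_add]
    apply congrArg
    apply List.map_congr_left
    intro i hi
    have hilt : i < (hd :: tl).length := List.mem_range.mp hi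
    set v := (hd :: tl).getD i 0 with hv
    have hek : ((hd :: tl).eraseIdx i).length = (hd :: tl).length - 1 := by
      rw [List.length_eraseIdx_of_lt hilt]
    rw [hek, pvGo_eq M t _ _ _ _ hek, one_mul]
    rw [List.map_map]
    apply congrArg
    apply List.map_congr_left
    intro p _
    simp only [Function.comp]
    exact pvW_char M t p v

-- ===== VERDICT (by name: the statement is the Claim_ definition above) =====
theorem direct_ET_spec : Claim_equal_direct_ET := by
  intro A n t_val _ _
  unfold Spec_direct_ET direct_ET direct_ET_alt
  exact main_eq A t_val (PySem.List.pyRange 0 n 1)
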